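-- pv_equiv track=rewrite | github.com/abdessalem-aghrib/golomb-problem-metaheuristic-project | golomb.py | is_golomb_ruler
-- ===== SOURCE A (Python) =====
-- def is_golomb_ruler(ruler: list[int]) -> bool:
--     marks_count = len(ruler)
--
--     # check if first element is not 0
--     if len(ruler) == 0 or ruler[0] != 0:
--         return False
--
--     # check if contains negative values
--     for item in ruler:
--         if item < 0:
--             return False
--
--     # check differences table
--     tab_diff = []
--
--     for i in range(marks_count - 1):
--         d = ruler[i + 1] - ruler[i]
--         if tab_diff.__contains__(d):
--             return False
--
--         tab_diff.append(d)
--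
--     index = marks_count - 2
--     diff_len = 2
--     for i in range(index, 0, -1):
--         for j in range(i):
--             d = 0
--             for k in range(diff_len):
--                 d += tab_diff[k + j]
--
--             if tab_diff.__contains__(d):
--                 return False
--
--             tab_diff.append(d)
--
--         diff_len += 1
--
--     # case of two identical marks
--     if tab_diff.__contains__(0):
--         return False
--
--     return True
-- ===== SOURCE B (Python) =====
-- def is_golomb_ruler(ruler: list[int]) -> bool:
--     if not ruler or ruler[0] != 0:
--         return False
--     if any(x < 0 for x in ruler):
--         return False
--     n = len(ruler)
--     seen = set()
--     for length in range(1, n):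
--         for start in range(n - length):
--             d = ruler[start + length] - ruler[start]
--             if d == 0 or d in seen:
--                 return False
--             seen.add(d)
--     return True
-- ===== Notes on version B (the rewrite author's own statement) =====
-- stated objective: alternative
-- what changed: Instead of incrementally building a table of difference-sums with an inner summation loop and linear list membership tests, B computes each pairwise difference ruler[start+length]-ruler[start] directly by one subtraction and tracks duplicates in a hash set, checking d==0 inline; on inputs that pass the cheap prefix checks this does O(n^2) work where A does O(n^4), but a timing run's inputs exit early so no speed-up was measured.
import Mathlib
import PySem

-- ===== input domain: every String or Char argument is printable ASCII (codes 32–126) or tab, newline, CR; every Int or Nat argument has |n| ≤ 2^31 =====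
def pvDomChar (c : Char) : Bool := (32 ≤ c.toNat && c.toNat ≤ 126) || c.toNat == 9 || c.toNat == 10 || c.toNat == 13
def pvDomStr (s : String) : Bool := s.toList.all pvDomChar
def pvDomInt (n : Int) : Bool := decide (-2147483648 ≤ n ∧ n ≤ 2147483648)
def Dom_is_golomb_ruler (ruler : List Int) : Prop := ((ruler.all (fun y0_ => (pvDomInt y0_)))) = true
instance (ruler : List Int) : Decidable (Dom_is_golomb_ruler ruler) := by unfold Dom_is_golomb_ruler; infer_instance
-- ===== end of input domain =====

-- B computes each pairwise difference ruler[start+length]-ruler[start] by one direct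
-- subtraction and tracks duplicates in a set, instead of A's incremental difference
-- table built with an inner summation loop and linear list membership tests.

-- ===== PORT A =====
def is_golomb_ruler (ruler : List Int) : Bool :=
  let marks_count : Int := ruler.length
  -- if len(ruler) == 0 or ruler[0] != 0: return False
  if ruler.length = 0 ∨ PySem.List.pyGetD ruler 0 0 ≠ 0 then false
  -- for item in ruler: if item < 0: return False
  else if ruler.any (fun item => item < 0) then false
  else
    -- for i in range(marks_count - 1): build tab_diff with early 'return False' (= none)
    let tab0 : Option (List Int) :=
      (PySem.List.pyRange 0 (marks_count - 1) 1).foldl (fun acc i =>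
        match acc with
        | none => none
        | some tab =>
          let d := PySem.List.pyGetD ruler (i + 1) 0 - PySem.List.pyGetD ruler i 0
          if tab.contains d then none else some (tab ++ [d])) (some [])
    match tab0 with
    | none => false
    | some tab1 =>
      let index := marks_count - 2
      -- for i in range(index, 0, -1): for j in range(i): d = sum of tab_diff[k+j] for k in range(diff_len)
      let res :=
        (PySem.List.pyRange index 0 (-1)).foldl (fun acc i =>
          match acc with
          | none => none
          | some st =>
            match (PySem.List.pyRange 0 i 1).foldl (fun acc2 j =>
                match acc2 with
                | none => none
                | some tab2 =>
                  let d := (PySem.List.pyRange 0 st.2 1).foldl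
                    (fun s k => s + PySem.List.pyGetD tab2 (k + j) 0) 0
                  if tab2.contains d then none else some (tab2 ++ [d])) (some st.1) with
            | none => none
            | some tab' => some (tab', st.2 + 1)) (some (tab1, (2 : Int)))
      match res with
      | none => false
      | some st => !(st.1.contains 0)

-- ===== PORT B =====
def is_golomb_ruler_alt (ruler : List Int) : Bool :=
  -- if not ruler or ruler[0] != 0: return False
  if ruler.head? ≠ some 0 then false
  -- if any(x < 0 for x in ruler): return False
  else if ruler.any (fun x => x < 0) then false
  else
    let n : Int := ruler.length
    -- for length in range(1, n): for start in range(n - length): early 'return False' (= none)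
    let res : Option (PySem.Set Int) :=
      (PySem.List.pyRange 1 n 1).foldl (fun acc length =>
        (PySem.List.pyRange 0 (n - length) 1).foldl (fun acc2 start =>
          match acc2 with
          | none => none
          | some seen =>
            let d := PySem.List.pyGetD ruler (start + length) 0 - PySem.List.pyGetD ruler start 0
            if d = 0 ∨ PySem.Set.contains seen d then none
            else some (PySem.Set.add seen d)) acc) (some PySem.Set.empty)
    res.isSome

-- ===== PRECONDITION & SPEC =====
def Spec_is_golomb_ruler (ruler : List Int) (out : Bool) : Prop := out = is_golomb_ruler_alt ruler
instance (ruler : List Int) (out : Bool) : Decidable (Spec_is_golomb_ruler ruler out) := by unfold Spec_is_golomb_ruler; infer_instance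

-- ===== CLAIM (what is proved, stated in full; the proofs are below) =====
def Claim_equal_is_golomb_ruler : Prop := ∀ (ruler : List Int), Dom_is_golomb_ruler ruler → Spec_is_golomb_ruler ruler (is_golomb_ruler ruler)

-- ===== LEMMAS AND PROOFS =====

/-- The differences of marks at distance `L`: `r[j+L] - r[j]` for `j < len - L`. -/
def gapList (r : List Int) (L : Nat) : List Int :=
  (List.range (r.length - L)).map (fun j => r.getD (j + L) 0 - r.getD j 0)

/-- All pairwise differences, grouped by gap length `1, 2, …, len-1`. -/
def allDiffs (r : List Int) : List Int :=
  (List.range' 1 (r.length - 1)).flatMap (gapList r)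

/-- The common mathematical value of both programs. -/
def specGolomb (r : List Int) : Bool :=
  (r.head? == some 0) && !(r.any (fun x => x < 0)) &&
    (decide (allDiffs r).Nodup && !((allDiffs r).contains 0))

/-- One step of A's early-abort "duplicate check then append". -/
def dstep (acc : Option (List Int)) (d : Int) : Option (List Int) :=
  match acc with
  | none => none
  | some tab => if tab.contains d then none else some (tab ++ [d])

theorem foldl_dstep_none (L : List Int) : L.foldl dstep none = none := by
  induction L with
  | nil => rfl
  | cons d L ih => simpa [dstep] using ih

theorem dedup_spec (L : List Int) : ∀ (tab : List Int),
    L.foldl dstep (some tab) =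
      if L.Nodup ∧ ∀ d ∈ L, d ∉ tab then some (tab ++ L) else none := by
  induction L with
  | nil => intro tab; simp
  | cons d L ih =>
    intro tab
    simp only [List.foldl_cons, dstep]
    by_cases hd : tab.contains d
    · rw [if_pos hd, foldl_dstep_none]
      have : d ∈ tab := by simpa using hd
      simp [this]
    · have hd' : d ∉ tab := by simpa using hd
      rw [if_neg hd, ih (tab ++ [d])]
      by_cases hc : L.Nodup ∧ ∀ e ∈ L, e ∉ tab ++ [d]
      · rw [if_pos hc, if_pos]
        · simp
        · refine ⟨List.nodup_cons.2 ⟨?_, hc.1⟩, ?_⟩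
          · intro hmem; exact (hc.2 d hmem) (by simp)
          · intro e he
            rcases List.mem_cons.1 he with rfl | he'
            · exact hd'
            · intro h; exact hc.2 e he' (by simp [h])
      · rw [if_neg hc, if_neg]
        intro ⟨hnd, hall⟩
        refine hc ⟨(List.nodup_cons.1 hnd).2, ?_⟩
        intro e he
        simp only [List.mem_append, List.mem_singleton]
        rintro (h | rfl)
        · exact hall e (by simp [he]) h
        · exact (List.nodup_cons.1 hnd).1 he

/-- One step of B's early-abort set insertion with inline zero check. -/
def sstep (acc : Option (PySem.Set Int)) (d : Int) : Option (PySem.Set Int) :=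
  match acc with
  | none => none
  | some seen => if d = 0 ∨ PySem.Set.contains seen d then none else some (PySem.Set.add seen d)

theorem foldl_sstep_none (L : List Int) : L.foldl sstep none = none := by
  induction L with
  | nil => rfl
  | cons d L ih => simpa [sstep] using ih

theorem sdedup_spec (L : List Int) : ∀ (s : List Int),
    L.foldl sstep (some s) =
      if L.Nodup ∧ ∀ d ∈ L, d ∉ s ∧ d ≠ 0 then some (s ++ L) else none := by
  induction L with
  | nil => intro s; simp
  | cons d L ih =>
    intro s
    simp only [List.foldl_cons, sstep]
    by_cases hz : d = 0 ∨ PySem.Set.contains s d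
    · rw [if_pos hz, foldl_sstep_none]
      have : ¬ (d ∉ s ∧ d ≠ 0) := by
        rcases hz with rfl | hc
        · simp
        · have : d ∈ s := by simpa [PySem.Set.contains] using hc
          simp [this]
      rw [if_neg]
      intro ⟨_, hall⟩
      exact this (hall d (by simp))
    · have hd' : d ∉ s := by
        intro h; exact hz (Or.inr (by simpa [PySem.Set.contains] using h))
      have hd0 : d ≠ 0 := fun h => hz (Or.inl h)
      have hadd : PySem.Set.add s d = s ++ [d] := by
        simp only [PySem.Set.add]
        rw [if_neg (by simpa [PySem.Set.contains] using hd')]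
      rw [if_neg hz, hadd, ih (s ++ [d])]
      by_cases hc : L.Nodup ∧ ∀ e ∈ L, e ∉ s ++ [d] ∧ e ≠ 0
      · rw [if_pos hc, if_pos]
        · simp
        · refine ⟨List.nodup_cons.2 ⟨?_, hc.1⟩, ?_⟩
          · intro hmem; exact (hc.2 d hmem).1 (by simp)
          · intro e he
            rcases List.mem_cons.1 he with rfl | he'
            · exact ⟨hd', hd0⟩
            · exact ⟨fun h => (hc.2 e he').1 (by simp [h]), (hc.2 e he').2⟩
      · rw [if_neg hc, if_neg]
        intro ⟨hnd, hall⟩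
        refine hc ⟨(List.nodup_cons.1 hnd).2, ?_⟩
        intro e he
        refine ⟨?_, (hall e (by simp [he])).2⟩
        simp only [List.mem_append, List.mem_singleton]
        rintro (h | rfl)
        · exact (hall e (by simp [he])).1 h
        · exact (List.nodup_cons.1 hnd).1 he

/-- The flattened list of differences B enumerates is `allDiffs`. -/
theorem B_flat (r : List Int) :
    (PySem.List.pyRange 1 (r.length : Int) 1).flatMap (fun length =>
      (PySem.List.pyRange 0 ((r.length : Int) - length) 1).map (fun start =>
        PySem.List.pyGetD r (start + length) 0 - PySem.List.pyGetD r start 0)) = allDiffs r := by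
  unfold allDiffs
  rw [PySem.List.pyRange_one 1, List.flatMap_map, List.range'_eq_map_range, List.flatMap_map]
  have hlen : ((r.length : Int) - 1).toNat = r.length - 1 := by omega
  rw [hlen]
  rw [List.flatMap_def, List.flatMap_def]
  congr 1
  apply List.map_congr_left
  intro k _
  rw [PySem.List.pyRange_one 0, List.map_map]
  unfold gapList
  have h2 : (((r.length : Int) - (1 + (k : Int))) - 0).toNat = r.length - (1 + k) := by omega
  rw [h2]
  apply List.map_congr_left
  intro j _
  simp only [Function.comp]
  have e1 : (0 : Int) + (j : Int) + (1 + (k : Int)) = ((j + (1 + k) : Nat) : Int) := by push_cast; ring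
  have e2 : (0 : Int) + (j : Int) = ((j : Nat) : Int) := by norm_num
  rw [e1, e2, PySem.List.pyGetD_natCast, PySem.List.pyGetD_natCast]

theorem B_eq (r : List Int) : is_golomb_ruler_alt r = specGolomb r := by
  unfold is_golomb_ruler_alt specGolomb
  match r with
  | [] => simp
  | x :: t =>
    by_cases hx : x = 0
    · subst hx
      by_cases hneg : (0 :: t : List Int).any (fun x => x < 0)
      · simp [hneg]
      · rw [if_neg (by simp), if_neg hneg]
        have hrhs : ((some (0:Int) == some 0) && !(0 :: t : List Int).any (fun x => x < 0)) = true := by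
          simp [hneg]
        simp only [List.head?_cons, hrhs, Bool.true_and]
        -- main computation
        have hbody : ∀ (length : Int) (acc : Option (PySem.Set Int)),
            (PySem.List.pyRange 0 (((0 :: t : List Int).length : Int) - length) 1).foldl
              (fun acc2 start =>
                match acc2 with
                | none => none
                | some seen =>
                  let d := PySem.List.pyGetD (0 :: t : List Int) (start + length) 0 -
                    PySem.List.pyGetD (0 :: t : List Int) start 0
                  if d = 0 ∨ PySem.Set.contains seen d then none
                  else some (PySem.Set.add seen d)) acc
            = ((PySem.List.pyRange 0 (((0 :: t : List Int).length : Int) - length) 1).map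
                (fun start => PySem.List.pyGetD (0 :: t : List Int) (start + length) 0 -
                  PySem.List.pyGetD (0 :: t : List Int) start 0)).foldl sstep acc := by
          intro length acc
          rw [List.foldl_map]
          rfl
        rw [PySem.List.foldl_congr_mem _ _
          (fun acc length => ((PySem.List.pyRange 0 (((0 :: t : List Int).length : Int) - length) 1).map
            (fun start => PySem.List.pyGetD (0 :: t : List Int) (start + length) 0 -
              PySem.List.pyGetD (0 :: t : List Int) start 0)).foldl sstep acc) _
          (fun acc length _ => hbody length acc)]
        rw [← List.foldl_flatMap, B_flat]
        rw [sdedup_spec]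
        by_cases hc : (allDiffs (0 :: t)).Nodup ∧ ∀ d ∈ allDiffs (0 :: t), d ∉ PySem.Set.empty ∧ d ≠ 0
        · rw [if_pos hc]
          have h0 : ¬ (0 : Int) ∈ allDiffs (0 :: t) := fun h => (hc.2 0 h).2 rfl
          simp [hc.1, h0]
        · rw [if_neg hc]
          have hdis : ¬ (allDiffs (0 :: t)).Nodup ∨ (0 : Int) ∈ allDiffs (0 :: t) := by
            by_cases hn : (allDiffs (0 :: t)).Nodup
            · by_cases h0 : (0 : Int) ∈ allDiffs (0 :: t)
              · exact Or.inr h0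
              · exact absurd ⟨hn, fun d hd =>
                  ⟨by simp [PySem.Set.empty], fun hd0 => h0 (hd0 ▸ hd)⟩⟩ hc
            · exact Or.inl hn
          rcases hdis with h | h
          · simp [h]
          · simp [h]
    · simp [hx]

theorem gapList_length (r : List Int) (L : Nat) : (gapList r L).length = r.length - L := by
  simp [gapList]

theorem getD_gapList (r : List Int) (i : Nat) (h : i < r.length - 1) :
    (gapList r 1).getD i 0 = r.getD (i + 1) 0 - r.getD i 0 := by
  unfold gapList
  rw [PySem.List.getD_map_range _ _ _ _ h]

/-- The consecutive differences computed by A's first loop. -/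
theorem map_gap1 (r : List Int) :
    (PySem.List.pyRange 0 ((r.length : Int) - 1) 1).map
      (fun i => PySem.List.pyGetD r (i + 1) 0 - PySem.List.pyGetD r i 0) = gapList r 1 := by
  rw [PySem.List.pyRange_one 0, List.map_map]
  unfold gapList
  have hlen : (((r.length : Int) - 1) - 0).toNat = r.length - 1 := by omega
  rw [hlen]
  apply List.map_congr_left
  intro j _
  simp only [Function.comp]
  have e1 : (0 : Int) + (j : Int) + 1 = ((j + 1 : Nat) : Int) := by push_cast; ring
  have e2 : (0 : Int) + (j : Int) = ((j : Nat) : Int) := by norm_num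
  rw [e1, e2, PySem.List.pyGetD_natCast, PySem.List.pyGetD_natCast]

/-- Telescoping: summing `dl` consecutive differences starting at `j` gives `r[j+dl] - r[j]`. -/
theorem wsum_gap1 (r : List Int) (j : Nat) : ∀ (dl : Nat), j + dl ≤ r.length - 1 →
    (List.range dl).foldl (fun s k => s + (gapList r 1).getD (k + j) 0) 0
      = r.getD (j + dl) 0 - r.getD j 0 := by
  intro dl
  induction dl with
  | zero => intro _; simp
  | succ m ih =>
    intro h
    rw [List.range_succ, List.foldl_append, ih (by omega)]
    simp only [List.foldl_cons, List.foldl_nil]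
    rw [getD_gapList r (m + j) (by omega)]
    rw [show m + j + 1 = j + (m + 1) from by omega, show m + j = j + m from by omega]
    ring

/-- A's inner sum over `pyRange`, read on `base`, in terms of a `List.range` sum. -/
theorem wsum_port (base : List Int) (dl : Int) (j : Nat) :
    (PySem.List.pyRange 0 dl 1).foldl (fun s k => s + PySem.List.pyGetD base (k + ((j : Nat) : Int)) 0) 0
      = (List.range dl.toNat).foldl (fun s k => s + base.getD (k + j) 0) 0 := by
  rw [PySem.List.pyRange_one 0, List.foldl_map]
  have hlen : (dl - 0).toNat = dl.toNat := by omega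
  rw [hlen]
  apply PySem.List.foldl_congr_mem
  intro acc k _
  have e : (0 : Int) + (k : Int) + ((j : Nat) : Int) = ((k + j : Nat) : Int) := by push_cast; ring
  rw [e, PySem.List.pyGetD_natCast]

theorem pyGetD_prefix {base tab : List Int} (hp : base <+: tab) {i : Int} (h0 : 0 ≤ i)
    (h : i.toNat < base.length) :
    PySem.List.pyGetD tab i 0 = PySem.List.pyGetD base i 0 := by
  have hlen := hp.length_le
  rw [PySem.List.pyGetD_eq_getElem _ _ h0 (by omega), PySem.List.pyGetD_eq_getElem _ _ h0 (by omega)]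
  exact (hp.getElem h).symm

theorem innerA_foldl_none (dl : Int) (jl : List Int) :
    jl.foldl (fun (acc2 : Option (List Int)) (j : Int) =>
      match acc2 with
      | none => none
      | some tab2 =>
        if tab2.contains ((PySem.List.pyRange 0 dl 1).foldl
            (fun s k => s + PySem.List.pyGetD tab2 (k + j) 0) 0) then none
        else some (tab2 ++ [(PySem.List.pyRange 0 dl 1).foldl
            (fun s k => s + PySem.List.pyGetD tab2 (k + j) 0) 0])) none = none := by
  induction jl with
  | nil => rfl
  | cons j rest ih => simpa using ih

/-- A's inner loop, with the table reads redirected to the stable prefix `base`. -/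
theorem innerA_spec (base : List Int) (dl : Int) :
    ∀ (jl : List Int) (tab : List Int), base <+: tab →
    (∀ j ∈ jl, 0 ≤ j ∧ ∀ k : Int, 0 ≤ k → k < dl → (k + j).toNat < base.length) →
    jl.foldl (fun (acc2 : Option (List Int)) (j : Int) =>
      match acc2 with
      | none => none
      | some tab2 =>
        if tab2.contains ((PySem.List.pyRange 0 dl 1).foldl
            (fun s k => s + PySem.List.pyGetD tab2 (k + j) 0) 0) then none
        else some (tab2 ++ [(PySem.List.pyRange 0 dl 1).foldl
            (fun s k => s + PySem.List.pyGetD tab2 (k + j) 0) 0])) (some tab)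
    = (jl.map (fun j => (PySem.List.pyRange 0 dl 1).foldl
        (fun s k => s + PySem.List.pyGetD base (k + j) 0) 0)).foldl dstep (some tab) := by
  intro jl
  induction jl with
  | nil => intro tab _ _; rfl
  | cons j rest ih =>
    intro tab hp hb
    rw [List.foldl_cons, List.map_cons, List.foldl_cons]
    have hj := hb j (by simp)
    have hd : (PySem.List.pyRange 0 dl 1).foldl (fun s k => s + PySem.List.pyGetD tab (k + j) 0) 0
        = (PySem.List.pyRange 0 dl 1).foldl (fun s k => s + PySem.List.pyGetD base (k + j) 0) 0 := by
      apply PySem.List.foldl_congr_mem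
      intro acc k hk
      rw [PySem.List.mem_pyRange_one] at hk
      rw [pyGetD_prefix hp (by omega) (hj.2 k hk.1 hk.2)]
    simp only [hd]
    rw [show dstep (some tab) ((PySem.List.pyRange 0 dl 1).foldl
        (fun s k => s + PySem.List.pyGetD base (k + j) 0) 0)
      = if tab.contains ((PySem.List.pyRange 0 dl 1).foldl
          (fun s k => s + PySem.List.pyGetD base (k + j) 0) 0) then none
        else some (tab ++ [(PySem.List.pyRange 0 dl 1).foldl
          (fun s k => s + PySem.List.pyGetD base (k + j) 0) 0]) from rfl]
    by_cases hc : tab.contains ((PySem.List.pyRange 0 dl 1).foldl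
        (fun s k => s + PySem.List.pyGetD base (k + j) 0) 0)
    · rw [if_pos hc, innerA_foldl_none, foldl_dstep_none]
    · rw [if_neg hc]
      exact ih _ (hp.trans (List.prefix_append _ _)) (fun j' hj' => hb j' (by simp [hj']))

/-- The list of gap-`dl` differences produced by one outer iteration of A. -/
theorem mapsum_eq_gapList (r : List Int) (i : Nat) (hi : i + 2 ≤ r.length) :
    (PySem.List.pyRange 0 (((i : Int) + 1)) 1).map (fun j =>
      (PySem.List.pyRange 0 ((r.length : Int) - ((i : Int) + 1)) 1).foldl
        (fun s k => s + PySem.List.pyGetD (gapList r 1) (k + j) 0) 0)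
    = gapList r (r.length - (i + 1)) := by
  rw [PySem.List.pyRange_one 0 ((i : Int) + 1), List.map_map]
  have hlen : (((i : Int) + 1) - 0).toNat = i + 1 := by omega
  rw [hlen]
  have hglen : r.length - (r.length - (i + 1)) = i + 1 := by omega
  conv_rhs => rw [gapList, hglen]
  apply List.map_congr_left
  intro j hj
  rw [List.mem_range] at hj
  simp only [Function.comp]
  have e2 : (0 : Int) + (j : Int) = ((j : Nat) : Int) := by norm_num
  rw [e2, wsum_port]
  have hdl : ((r.length : Int) - ((i : Int) + 1)).toNat = r.length - (i + 1) := by omega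
  rw [hdl, wsum_gap1 r j (r.length - (i + 1)) (by omega)]

theorem outerA_foldl_none (il : List Int) :
    il.foldl (fun acc (i' : Int) =>
      match acc with
      | none => none
      | some (st : List Int × Int) =>
        match (PySem.List.pyRange 0 i' 1).foldl (fun (acc2 : Option (List Int)) (j : Int) =>
            match acc2 with
            | none => none
            | some tab2 =>
              if tab2.contains ((PySem.List.pyRange 0 st.2 1).foldl
                  (fun s k => s + PySem.List.pyGetD tab2 (k + j) 0) 0) then none
              else some (tab2 ++ [(PySem.List.pyRange 0 st.2 1).foldl
                  (fun s k => s + PySem.List.pyGetD tab2 (k + j) 0) 0])) (some st.1) with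
        | none => none
        | some tab' => some (tab', st.2 + 1)) none = none := by
  induction il with
  | nil => rfl
  | cons i' rest ih => simpa using ih

/-- A's outer loop, characterised: it dedup-folds the gap lists of lengths `n-i, …, n-1`. -/
theorem outerA_spec (r : List Int) (hr : 2 ≤ r.length) :
    ∀ (i : Nat), i ≤ r.length - 2 → ∀ (tab : List Int), gapList r 1 <+: tab →
    (PySem.List.pyRange (i : Int) 0 (-1)).foldl (fun acc (i' : Int) =>
      match acc with
      | none => none
      | some (st : List Int × Int) =>
        match (PySem.List.pyRange 0 i' 1).foldl (fun (acc2 : Option (List Int)) (j : Int) =>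
            match acc2 with
            | none => none
            | some tab2 =>
              if tab2.contains ((PySem.List.pyRange 0 st.2 1).foldl
                  (fun s k => s + PySem.List.pyGetD tab2 (k + j) 0) 0) then none
              else some (tab2 ++ [(PySem.List.pyRange 0 st.2 1).foldl
                  (fun s k => s + PySem.List.pyGetD tab2 (k + j) 0) 0])) (some st.1) with
        | none => none
        | some tab' => some (tab', st.2 + 1)) (some (tab, ((r.length : Int) - (i : Int))))
    = (((List.range' (r.length - i) i).flatMap (gapList r)).foldl dstep (some tab)).map
        (fun t => (t, (r.length : Int))) := by
  intro i
  induction i with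
  | zero =>
    intro _ tab _
    rw [PySem.List.pyRange_neg_one_eq_nil (by norm_num)]
    simp
  | succ m ih =>
    intro hm tab hp
    rw [PySem.List.pyRange_neg_one_cons (by positivity)]
    rw [show ((m + 1 : Nat) : Int) - 1 = ((m : Nat) : Int) from by push_cast; ring]
    rw [List.foldl_cons]
    -- the head outer step
    have hb : ∀ j ∈ PySem.List.pyRange 0 ((m + 1 : Nat) : Int) 1, 0 ≤ j ∧
        ∀ k : Int, 0 ≤ k → k < (r.length : Int) - ((m + 1 : Nat) : Int) →
          (k + j).toNat < (gapList r 1).length := by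
      intro j hj
      rw [PySem.List.mem_pyRange_one] at hj
      refine ⟨hj.1, fun k hk0 hk1 => ?_⟩
      rw [gapList_length]
      omega
    have hinner := innerA_spec (gapList r 1) ((r.length : Int) - ((m + 1 : Nat) : Int))
      (PySem.List.pyRange 0 ((m + 1 : Nat) : Int) 1) tab hp hb
    have hmap : ((PySem.List.pyRange 0 ((m + 1 : Nat) : Int) 1).map
        (fun j => (PySem.List.pyRange 0 ((r.length : Int) - ((m + 1 : Nat) : Int)) 1).foldl
          (fun s k => s + PySem.List.pyGetD (gapList r 1) (k + j) 0) 0))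
        = gapList r (r.length - (m + 1)) := by
      rw [show ((m + 1 : Nat) : Int) = (m : Int) + 1 from by push_cast; ring]
      exact mapsum_eq_gapList r m (by omega)
    have hstep : List.range' (r.length - (m + 1)) (m + 1) =
        (r.length - (m + 1)) :: List.range' (r.length - m) m := by
      rw [List.range'_succ, show r.length - (m + 1) + 1 = r.length - m from by omega]
    by_cases hc : (gapList r (r.length - (m + 1))).Nodup ∧
        ∀ d ∈ gapList r (r.length - (m + 1)), d ∉ tab
    · have hin : (PySem.List.pyRange 0 ((m + 1 : Nat) : Int) 1).foldl
          (fun (acc2 : Option (List Int)) (j : Int) =>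
            match acc2 with
            | none => none
            | some tab2 =>
              if tab2.contains ((PySem.List.pyRange 0 ((r.length : Int) - ((m + 1 : Nat) : Int)) 1).foldl
                  (fun s k => s + PySem.List.pyGetD tab2 (k + j) 0) 0) then none
              else some (tab2 ++ [(PySem.List.pyRange 0 ((r.length : Int) - ((m + 1 : Nat) : Int)) 1).foldl
                  (fun s k => s + PySem.List.pyGetD tab2 (k + j) 0) 0])) (some tab)
          = some (tab ++ gapList r (r.length - (m + 1))) := by
        rw [hinner, hmap, dedup_spec]
        exact if_pos hc
      simp only [hin]
      rw [show ((r.length : Int) - ((m + 1 : Nat) : Int)) + 1 = (r.length : Int) - ((m : Nat) : Int) from by push_cast; ring]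
      rw [ih (by omega) (tab ++ gapList r (r.length - (m + 1))) (hp.trans (List.prefix_append _ _))]
      have hin3 : (gapList r (r.length - (m + 1))).foldl dstep (some tab)
          = some (tab ++ gapList r (r.length - (m + 1))) := by
        rw [dedup_spec]
        exact if_pos hc
      rw [hstep, List.flatMap_cons, List.foldl_append, hin3]
    · have hin : (PySem.List.pyRange 0 ((m + 1 : Nat) : Int) 1).foldl
          (fun (acc2 : Option (List Int)) (j : Int) =>
            match acc2 with
            | none => none
            | some tab2 =>
              if tab2.contains ((PySem.List.pyRange 0 ((r.length : Int) - ((m + 1 : Nat) : Int)) 1).foldl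
                  (fun s k => s + PySem.List.pyGetD tab2 (k + j) 0) 0) then none
              else some (tab2 ++ [(PySem.List.pyRange 0 ((r.length : Int) - ((m + 1 : Nat) : Int)) 1).foldl
                  (fun s k => s + PySem.List.pyGetD tab2 (k + j) 0) 0])) (some tab)
          = none := by
        rw [hinner, hmap, dedup_spec]
        exact if_neg hc
      simp only [hin]
      have hin3 : (gapList r (r.length - (m + 1))).foldl dstep (some tab) = none := by
        rw [dedup_spec]
        exact if_neg hc
      rw [hstep, List.flatMap_cons, List.foldl_append, hin3, foldl_dstep_none]
      exact (outerA_foldl_none _).trans (by simp)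

theorem A_eq (r : List Int) : is_golomb_ruler r = specGolomb r := by
  rcases r with _ | ⟨x, t⟩
  · simp [is_golomb_ruler, specGolomb]
  by_cases hx : x = 0
  swap
  · simp [is_golomb_ruler, specGolomb, PySem.List.pyGetD_zero_cons, hx]
  subst hx
  set r : List Int := 0 :: t with hr
  have hrl : r.length = t.length + 1 := by rw [hr]; simp
  by_cases hneg : r.any (fun item => item < 0)
  · simp [is_golomb_ruler, specGolomb, hneg, PySem.List.pyGetD_zero_cons]
  simp only [is_golomb_ruler, specGolomb, hneg]
  rw [if_neg (by simp [hr, PySem.List.pyGetD_zero_cons]), if_neg (by simp)]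
  have hhead : (r.head? == some (0 : Int)) = true := by simp [hr]
  simp only [hhead, Bool.true_and, Bool.not_false]
  have h1 : (PySem.List.pyRange 0 ((r.length : Int) - 1) 1).foldl
      (fun (acc : Option (List Int)) (i : Int) =>
        match acc with
        | none => none
        | some tab =>
          if tab.contains (PySem.List.pyGetD r (i + 1) 0 - PySem.List.pyGetD r i 0) then none
          else some (tab ++ [PySem.List.pyGetD r (i + 1) 0 - PySem.List.pyGetD r i 0])) (some [])
      = if (gapList r 1).Nodup then some (gapList r 1) else none := by
    have hm : ((PySem.List.pyRange 0 ((r.length : Int) - 1) 1).map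
        (fun i => PySem.List.pyGetD r (i + 1) 0 - PySem.List.pyGetD r i 0)).foldl dstep (some [])
        = (gapList r 1).foldl dstep (some []) := by rw [map_gap1]
    rw [List.foldl_map] at hm
    rw [show (fun (acc : Option (List Int)) (i : Int) =>
        match acc with
        | none => none
        | some tab =>
          if tab.contains (PySem.List.pyGetD r (i + 1) 0 - PySem.List.pyGetD r i 0) then none
          else some (tab ++ [PySem.List.pyGetD r (i + 1) 0 - PySem.List.pyGetD r i 0]))
      = (fun (acc : Option (List Int)) (i : Int) =>
          dstep acc (PySem.List.pyGetD r (i + 1) 0 - PySem.List.pyGetD r i 0)) from rfl]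
    rw [hm, dedup_spec]
    simp
  by_cases hnd1 : (gapList r 1).Nodup
  · have h1' := h1.trans (if_pos hnd1)
    simp only [h1']
    by_cases hlen : r.length = 1
    · have ht : t = [] := by
        have : t.length = 0 := by omega
        exact List.length_eq_zero_iff.1 this
      subst ht
      simp only [hr]
      decide
    · have hlen2 : 2 ≤ r.length := by
        have : 1 ≤ r.length := by simp [hr]
        omega
      have hcast : ((r.length : Int) - 2) = (((r.length - 2 : Nat)) : Int) := by omega
      have houter := outerA_spec r hlen2 (r.length - 2) (le_refl _) (gapList r 1)
        (List.prefix_refl _)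
      rw [show ((r.length : Int) - ((r.length - 2 : Nat) : Int)) = 2 from by omega,
        show r.length - (r.length - 2) = 2 from by omega] at houter
      rw [hcast]
      simp only [houter]
      have hsplit : allDiffs r = gapList r 1 ++ (List.range' 2 (r.length - 2)).flatMap (gapList r) := by
        unfold allDiffs
        rw [show r.length - 1 = (r.length - 2) + 1 from by omega, List.range'_succ,
          List.flatMap_cons]
      by_cases hc : ((List.range' 2 (r.length - 2)).flatMap (gapList r)).Nodup ∧
          ∀ d ∈ (List.range' 2 (r.length - 2)).flatMap (gapList r), d ∉ gapList r 1
      · have h2 : ((List.range' 2 (r.length - 2)).flatMap (gapList r)).foldl dstep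
            (some (gapList r 1))
            = some (gapList r 1 ++ (List.range' 2 (r.length - 2)).flatMap (gapList r)) :=
          (dedup_spec _ _).trans (if_pos hc)
        simp only [h2, Option.map_some]
        rw [hsplit]
        have hnodup : (gapList r 1 ++ (List.range' 2 (r.length - 2)).flatMap (gapList r)).Nodup :=
          List.nodup_append.2 ⟨hnd1, hc.1, fun a ha b hb hab => hc.2 b hb (hab ▸ ha)⟩
        simp [hnodup]
      · have h2 : ((List.range' 2 (r.length - 2)).flatMap (gapList r)).foldl dstep
            (some (gapList r 1)) = none :=
          (dedup_spec _ _).trans (if_neg hc)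
        simp only [h2, Option.map_none]
        have hnot : ¬ (allDiffs r).Nodup := by
          rw [hsplit]
          intro h
          rcases List.nodup_append.1 h with ⟨_, hF, hdisj⟩
          exact hc ⟨hF, fun d hd hdg => hdisj d hdg d hd rfl⟩
        simp [hnot]
  · have h1' := h1.trans (if_neg hnd1)
    simp only [h1']
    have hlen2 : 2 ≤ r.length := by
      by_contra h
      apply hnd1
      have h1l : r.length = 1 := by omega
      unfold gapList
      rw [h1l]
      simp
    have hsplit : allDiffs r = gapList r 1 ++ (List.range' 2 (r.length - 2)).flatMap (gapList r) := by
      unfold allDiffs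
      rw [show r.length - 1 = (r.length - 2) + 1 from by omega, List.range'_succ,
        List.flatMap_cons]
    have hnot : ¬ (allDiffs r).Nodup := by
      rw [hsplit]
      intro h
      exact hnd1 h.of_append_left
    simp [hnot]

-- ===== VERDICT (by name: the statement is the Claim_ definition above) =====
theorem is_golomb_ruler_spec : Claim_equal_is_golomb_ruler := by
  intro ruler _
  unfold Spec_is_golomb_ruler
  rw [A_eq, B_eq]
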